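-- pv_equiv track=rewrite | github.com/abaldeg/EjerciciosPython | AbaldeGastonParcial1Ej1.py | rellenarmatrix
-- ===== SOURCE A (Python) =====
-- def rellenarmatrix(mat):
--     """Rellena matriz según patrón. Ingresa matriz y devuelva la misma matriz rellena por patrón."""
--     numimpar=1
--     numpar=2
--     cantf=len(mat)
--     cantc=len(mat[0])
--
--     for f in range(cantf):
--         if f%2!=0:
--             """es impar"""
--             for c in range(cantc):
--                 mat[f][c]=numimpar
--                 numimpar+=2
--         elif f%2==0 or f==0:
--             """es par"""
--             for c in range(cantc):
--                 mat[f][c]=numpar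
--                 numpar+=2
--
--     return mat
-- ===== SOURCE B (Python) =====
-- def rellenarmatrix(mat):
--     """Rellena matriz según patrón. Ingresa matriz y devuelva la misma matriz rellena por patrón."""
--     cantc = len(mat[0])
--     for f, row in enumerate(mat):
--         base = (f // 2) * cantc
--         for c in range(cantc):
--             row[c] = 2 * (base + c) + 2 - f % 2
--     return mat
-- ===== Notes on version B (the rewrite author's own statement) =====
-- stated objective: alternative
-- what changed: Replaced the two running odd/even counters carried across rows and the odd/even branch by a single branchless closed-form per-cell value 2*((f//2)*cantc+c)+2-f%2 computed from the position alone.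
import Mathlib
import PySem

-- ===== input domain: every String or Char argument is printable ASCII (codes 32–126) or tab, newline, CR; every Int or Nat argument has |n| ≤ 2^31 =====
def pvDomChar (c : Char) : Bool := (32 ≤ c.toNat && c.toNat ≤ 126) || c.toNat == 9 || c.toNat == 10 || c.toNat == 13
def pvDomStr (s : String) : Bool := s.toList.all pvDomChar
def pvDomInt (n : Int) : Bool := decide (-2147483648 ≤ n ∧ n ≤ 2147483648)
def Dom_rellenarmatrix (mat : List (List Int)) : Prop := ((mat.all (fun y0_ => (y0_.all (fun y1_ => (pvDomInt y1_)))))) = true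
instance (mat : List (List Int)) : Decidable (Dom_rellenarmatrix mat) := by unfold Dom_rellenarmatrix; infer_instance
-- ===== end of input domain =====

-- B replaces A's two running odd/even counters and the odd/even branch by one branchless
-- closed-form per-cell value computed from the position (alternative decomposition, same
-- cost); both mutate the matrix in place in Python, equal cell-by-cell, so the
-- return-value equivalence covers the mutation too.

-- ===== PORT A =====
-- inner loop body of A's odd-row branch: mat[f][c]=numimpar; numimpar+=2
def pvInnerOddA (f : Nat) (st : Int × Int × List (List Int)) (c : Nat) :
    Int × Int × List (List Int) :=
  (st.1 + 2, st.2.1, st.2.2.set f ((st.2.2.getD f []).set c st.1))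

-- inner loop body of A's even-row branch: mat[f][c]=numpar; numpar+=2
def pvInnerEvenA (f : Nat) (st : Int × Int × List (List Int)) (c : Nat) :
    Int × Int × List (List Int) :=
  (st.1, st.2.1 + 2, st.2.2.set f ((st.2.2.getD f []).set c st.2.1))

-- outer loop body of A (state = (numimpar, numpar, mat))
def pvStepA (cantc : Nat) (st : Int × Int × List (List Int)) (f : Nat) :
    Int × Int × List (List Int) :=
  if f % 2 ≠ 0 then (List.range cantc).foldl (pvInnerOddA f) st
  else (List.range cantc).foldl (pvInnerEvenA f) st

def rellenarmatrix (mat : List (List Int)) : List (List Int) :=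
  let cantf := mat.length
  let cantc := (mat.headD []).length   -- len(mat[0]); Pre_ excludes mat = [] where Python raises
  ((List.range cantf).foldl (pvStepA cantc) (1, 2, mat)).2.2

-- ===== PORT B =====
def rellenarmatrix_alt (mat : List (List Int)) : List (List Int) :=
  let cantc := (mat.headD []).length   -- len(mat[0]); Pre_ excludes mat = [] where Python raises
  (PySem.List.enumerate mat).map (fun fr =>
    let f := fr.1
    let base := PySem.Int.floordiv f 2 * (cantc : Int)
    -- inner loop: for c in range(cantc): row[c] = 2*(base+c) + 2 - f%2
    -- (row[c]= on a too-short row raises IndexError in Python; Pre_ excludes those inputs)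
    (List.range cantc).foldl
      (fun row (c : Nat) => row.set c (2 * (base + (c : Int)) + 2 - PySem.Int.mod f 2)) fr.2)

-- ===== PRECONDITION & SPEC =====
-- Pre_ excludes exactly the inputs where Python A raises IndexError (B raises there too):
-- the empty matrix (len(mat[0])) and matrices with a row shorter than the first row.
def Pre_rellenarmatrix (mat : List (List Int)) : Prop :=
  mat ≠ [] ∧ ∀ row ∈ mat, (mat.headD []).length ≤ row.length
instance (mat : List (List Int)) : Decidable (Pre_rellenarmatrix mat) := by
  unfold Pre_rellenarmatrix; infer_instance
def pvWitness_rellenarmatrix : List (List Int) := [[0, 0], [0, 0], [0, 0]]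

def Spec_rellenarmatrix (mat : List (List Int)) (out : List (List Int)) : Prop :=
  out = rellenarmatrix_alt mat
instance (mat : List (List Int)) (out : List (List Int)) : Decidable (Spec_rellenarmatrix mat out) := by
  unfold Spec_rellenarmatrix; infer_instance

-- ===== CLAIM (what is proved, stated in full; the proofs are below) =====
def Claim_equal_rellenarmatrix : Prop := ∀ (mat : List (List Int)), Dom_rellenarmatrix mat → Pre_rellenarmatrix mat → Spec_rellenarmatrix mat (rellenarmatrix mat)

-- ===== LEMMAS AND PROOFS =====

-- the value both programs give row f, in Nat-indexed branch form
def pvRowB (cantc f : Nat) (row : List Int) : List Int :=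
  if f % 2 ≠ 0 then
    ((List.range cantc).map (fun (c : Nat) => 2 * (((f / 2 : Nat) : Int) * cantc + (c : Int)) + 1)) ++ row.drop cantc
  else
    ((List.range cantc).map (fun (c : Nat) => 2 * (((f / 2 : Nat) : Int) * cantc + (c : Int) + 1))) ++ row.drop cantc

lemma pvSetLen (k : Nat) (l d : List Int) (v : Int) (hl : l.length = k) :
    (l ++ d).set k v = l ++ d.set 0 v := by subst hl; simp

-- B's inner fold of in-range sets rewrites the prefix pointwise
lemma pvFoldSet (g : Nat → Int) (k : Nat) (row : List Int) (hk : k ≤ row.length) :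
    (List.range k).foldl (fun r c => r.set c (g c)) row
      = (List.range k).map g ++ row.drop k := by
  induction k with
  | zero => simp
  | succ k ih =>
    rw [List.range_succ, List.foldl_append, ih (by omega)]
    simp only [List.foldl_cons, List.foldl_nil]
    have hlen : ((List.range k).map g).length = k := by simp
    have hdrop : row.drop k = row[k] :: row.drop (k + 1) :=
      List.drop_eq_getElem_cons (by omega)
    rw [hdrop, pvSetLen k _ _ _ hlen, List.set_cons_zero, List.map_append]
    simp

lemma pvAltEq (mat : List (List Int)) (hp : Pre_rellenarmatrix mat) :
    rellenarmatrix_alt mat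
      = (List.range mat.length).map (fun f => pvRowB (mat.headD []).length f (mat.getD f [])) := by
  unfold rellenarmatrix_alt
  apply List.ext_getElem
  · simp [PySem.List.length_enumerate]
  · intro k h1 h2
    simp only [List.length_map, PySem.List.length_enumerate] at h1
    rw [List.getElem_map, List.getElem_map, PySem.List.getElem_enumerate, List.getElem_range]
    have hrow : (mat.headD []).length ≤ mat[k].length :=
      hp.2 _ (List.getElem_mem h1)
    rw [pvFoldSet _ _ _ hrow]
    have hgd : mat.getD k [] = mat[k] := List.getD_eq_getElem _ _ h1
    have hdiv : PySem.Int.floordiv ((0 : Int) + k) 2 = ((k / 2 : Nat) : Int) := by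
      simp only [PySem.Int.floordiv, zero_add]
      rw [Int.fdiv_eq_ediv]
      push_cast
      rfl
    have hmod : PySem.Int.mod ((0 : Int) + k) 2 = ((k % 2 : Nat) : Int) := by
      simp only [PySem.Int.mod, zero_add]
      rw [Int.fmod_eq_emod]
      push_cast
      rfl
    unfold pvRowB
    rw [hgd, hdiv, hmod]
    by_cases hpar : k % 2 ≠ 0
    · have h1' : k % 2 = 1 := by omega
      rw [if_pos hpar]
      congr 1
      apply List.map_congr_left
      intro c _
      rw [h1']
      push_cast; ring
    · have h0 : k % 2 = 0 := by omega
      rw [if_neg hpar]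
      congr 1
      apply List.map_congr_left
      intro c _
      rw [h0]
      push_cast; ring

-- matrix after A has processed the first n rows (counters aside)
def pvMatN (mat : List (List Int)) (n : Nat) : List (List Int) :=
  (List.range mat.length).map (fun f =>
    if f < n then pvRowB (mat.headD []).length f (mat.getD f []) else mat.getD f [])

lemma pvMatN_zero (mat : List (List Int)) : pvMatN mat 0 = mat := by
  apply List.ext_getElem
  · simp [pvMatN]
  · intro i h1 h2
    have : mat[i]? = some mat[i] := List.getElem?_eq_getElem h2
    simp [pvMatN, List.getD, this]

lemma pvMatN_length (mat : List (List Int)) (n : Nat) : (pvMatN mat n).length = mat.length := by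
  simp [pvMatN]

lemma pvMatN_getD (mat : List (List Int)) (n : Nat) (hn : n < mat.length) :
    (pvMatN mat n).getD n [] = mat.getD n [] := by
  rw [List.getD_eq_getElem _ _ (by simpa [pvMatN] using hn)]
  simp [pvMatN]

lemma pvMatN_set (mat : List (List Int)) (n : Nat) (hn : n < mat.length) :
    (pvMatN mat n).set n (pvRowB (mat.headD []).length n (mat.getD n [])) = pvMatN mat (n + 1) := by
  apply List.ext_getElem
  · simp [pvMatN]
  · intro i h1 h2
    simp only [pvMatN, List.length_set, List.length_map, List.length_range] at h1 h2
    rw [List.getElem_set]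
    by_cases hi : i = n
    · subst hi
      simp [pvMatN, List.getElem_map, List.getElem_range]
    · rw [if_neg (by omega : ¬ n = i)]
      have hiff : i < n ↔ i < n + 1 := by omega
      simp [pvMatN, List.getElem_map, List.getElem_range, hiff]

lemma pvInnerOdd_spec (k : Nat) (ni np : Int) (m : List (List Int)) (f : Nat)
    (hf : f < m.length) (hk : k ≤ (m.getD f []).length) :
    (List.range k).foldl (pvInnerOddA f) (ni, np, m)
      = (ni + 2 * k, np,
         m.set f (((List.range k).map (fun (c : Nat) => ni + 2 * (c : Int))) ++ (m.getD f []).drop k)) := by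
  induction k with
  | zero =>
    refine Prod.ext (by simp) (Prod.ext rfl ?_)
    rw [List.range_zero, List.foldl_nil, List.map_nil, List.nil_append, List.drop_zero,
      List.getD_eq_getElem _ _ hf, List.set_getElem_self]
  | succ k ih =>
    rw [List.range_succ, List.foldl_append, ih (by omega)]
    simp only [List.foldl_cons, List.foldl_nil, pvInnerOddA]
    have hget : (m.set f (((List.range k).map (fun (c : Nat) => ni + 2 * (c : Int))) ++ (m.getD f []).drop k)).getD f []
        = ((List.range k).map (fun (c : Nat) => ni + 2 * (c : Int))) ++ (m.getD f []).drop k := by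
      simp [List.getD, hf]
    refine Prod.ext (by push_cast; ring) (Prod.ext rfl ?_)
    simp only [hget, List.set_set]
    congr 1
    have hlen : ((List.range k).map (fun (c : Nat) => ni + 2 * (c : Int))).length = k := by simp
    have hdrop : (m.getD f []).drop k = (m.getD f [])[k] :: (m.getD f []).drop (k+1) :=
      List.drop_eq_getElem_cons (by omega)
    rw [hdrop, pvSetLen k _ _ _ hlen]
    rw [List.set_cons_zero, List.map_append]
    simp

lemma pvInnerEven_spec (k : Nat) (ni np : Int) (m : List (List Int)) (f : Nat)
    (hf : f < m.length) (hk : k ≤ (m.getD f []).length) :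
    (List.range k).foldl (pvInnerEvenA f) (ni, np, m)
      = (ni, np + 2 * k,
         m.set f (((List.range k).map (fun (c : Nat) => np + 2 * (c : Int))) ++ (m.getD f []).drop k)) := by
  induction k with
  | zero =>
    refine Prod.ext rfl (Prod.ext (by simp) ?_)
    rw [List.range_zero, List.foldl_nil, List.map_nil, List.nil_append, List.drop_zero,
      List.getD_eq_getElem _ _ hf, List.set_getElem_self]
  | succ k ih =>
    rw [List.range_succ, List.foldl_append, ih (by omega)]
    simp only [List.foldl_cons, List.foldl_nil, pvInnerEvenA]
    have hget : (m.set f (((List.range k).map (fun (c : Nat) => np + 2 * (c : Int))) ++ (m.getD f []).drop k)).getD f []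
        = ((List.range k).map (fun (c : Nat) => np + 2 * (c : Int))) ++ (m.getD f []).drop k := by
      simp [List.getD, hf]
    refine Prod.ext rfl (Prod.ext (by push_cast; ring) ?_)
    simp only [hget, List.set_set]
    congr 1
    have hlen : ((List.range k).map (fun (c : Nat) => np + 2 * (c : Int))).length = k := by simp
    have hdrop : (m.getD f []).drop k = (m.getD f [])[k] :: (m.getD f []).drop (k+1) :=
      List.drop_eq_getElem_cons (by omega)
    rw [hdrop, pvSetLen k _ _ _ hlen]
    rw [List.set_cons_zero, List.map_append]
    simp

lemma pvOuter_spec (mat : List (List Int)) (hp : Pre_rellenarmatrix mat) (n : Nat)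
    (hn : n ≤ mat.length) :
    (List.range n).foldl (pvStepA (mat.headD []).length) (1, 2, mat)
      = (1 + 2 * ((((mat.headD []).length * (n / 2) : Nat)) : Int),
         2 + 2 * ((((mat.headD []).length * ((n + 1) / 2) : Nat)) : Int),
         pvMatN mat n) := by
  induction n with
  | zero => simp [pvMatN_zero]
  | succ n ih =>
    rw [List.range_succ, List.foldl_append, ih (by omega)]
    simp only [List.foldl_cons, List.foldl_nil]
    have hlt : n < mat.length := by omega
    have hlen : n < (pvMatN mat n).length := by rw [pvMatN_length]; omega
    have hcc : (mat.headD []).length ≤ ((pvMatN mat n).getD n []).length := by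
      rw [pvMatN_getD mat n hlt, List.getD_eq_getElem _ _ hlt]
      exact hp.2 _ (List.getElem_mem hlt)
    unfold pvStepA
    by_cases hpar : n % 2 ≠ 0
    · rw [if_pos hpar, pvInnerOdd_spec _ _ _ _ _ hlen hcc, pvMatN_getD mat n hlt]
      refine Prod.ext ?_ (Prod.ext ?_ ?_)
      · show (1 : Int) + 2 * _ + 2 * _ = _
        rw [show (n + 1) / 2 = n / 2 + 1 from by omega, Nat.mul_succ]
        push_cast; ring
      · show (2 : Int) + 2 * _ = 2 + 2 * _
        rw [show (n + 1 + 1) / 2 = (n + 1) / 2 from by omega]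
      · show (pvMatN mat n).set n _ = _
        rw [← pvMatN_set mat n hlt]
        congr 1
        unfold pvRowB
        rw [if_pos hpar]
        congr 1
        apply List.map_congr_left
        intro c _
        push_cast
        ring
    · rw [if_neg hpar, pvInnerEven_spec _ _ _ _ _ hlen hcc, pvMatN_getD mat n hlt]
      refine Prod.ext ?_ (Prod.ext ?_ ?_)
      · show (1 : Int) + 2 * _ = 1 + 2 * _
        rw [show (n + 1) / 2 = n / 2 from by omega]
      · show (2 : Int) + 2 * _ + 2 * _ = _
        rw [show (n + 1 + 1) / 2 = (n + 1) / 2 + 1 from by omega, Nat.mul_succ]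
        push_cast; ring
      · show (pvMatN mat n).set n _ = _
        rw [← pvMatN_set mat n hlt]
        congr 1
        unfold pvRowB
        rw [if_neg hpar]
        have hnn : (n + 1) / 2 = n / 2 := by omega
        congr 1
        apply List.map_congr_left
        intro c _
        rw [hnn]
        push_cast
        ring

-- ===== VERDICT (by name: the statement is the Claim_ definition above) =====
theorem rellenarmatrix_spec : Claim_equal_rellenarmatrix := by
  intro mat _ hp
  unfold Spec_rellenarmatrix
  show (((List.range mat.length).foldl (pvStepA (mat.headD []).length) (1, 2, mat)).2.2) = _
  rw [pvOuter_spec mat hp mat.length le_rfl, pvAltEq mat hp]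
  unfold pvMatN
  exact List.map_congr_left (by intro f hf; simp_all [List.mem_range])
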